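-- pv_equiv track=rewrite | github.com/HTaeha/Algorithm_study | Hong/Kakao/2019_Kakao_winter_internship/bad_user.py | find_banned_id
-- ===== SOURCE A (Python) =====
-- def find_banned_id(user_id, b_id):
--     result = []
--     for u_id in user_id:
--         if len(u_id) != len(b_id):
--             continue
--         flag = True
--         for i, c in enumerate(b_id):
--             if not(c == '*' or c == u_id[i]):
--                 flag = False
--                 break
--         if flag:
--             result.append(u_id)
--
--     return result
-- ===== SOURCE B (Python) =====
-- def find_banned_id(user_id, b_id):
--     # Pairwise matcher consuming both strings together: a length mismatch
--     # falls out of the match itself, so no separate length check, index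
--     # loop, flag or break is needed.
--     def matches(p, u):
--         while p and u:
--             if p[0] != '*' and p[0] != u[0]:
--                 return False
--             p, u = p[1:], u[1:]
--         return not p and not u
--     return [u for u in user_id if matches(b_id, u)]
-- ===== Notes on version B (the rewrite author's own statement) =====
-- stated objective: simpler
-- what changed: Replaces the length check plus index-based inner loop with flag/break by a recursive pairwise character matcher over the two strings (length mismatch falls out of the recursion) and a filter comprehension.
import Mathlib
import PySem

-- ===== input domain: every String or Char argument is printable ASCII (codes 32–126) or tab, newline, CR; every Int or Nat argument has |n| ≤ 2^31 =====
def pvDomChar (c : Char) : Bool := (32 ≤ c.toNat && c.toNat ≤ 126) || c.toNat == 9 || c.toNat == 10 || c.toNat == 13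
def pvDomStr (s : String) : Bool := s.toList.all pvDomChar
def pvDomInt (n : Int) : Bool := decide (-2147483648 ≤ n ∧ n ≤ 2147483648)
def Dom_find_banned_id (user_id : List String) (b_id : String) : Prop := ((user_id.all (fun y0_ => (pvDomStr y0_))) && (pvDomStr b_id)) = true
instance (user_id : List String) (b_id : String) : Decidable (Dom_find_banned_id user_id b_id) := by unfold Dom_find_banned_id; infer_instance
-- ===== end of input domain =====

-- B replaces A's length check + index-based inner loop with flag/break by a
-- recursive pairwise matcher over the two strings and a filter (simpler; same cost).

-- ===== PORT A =====
-- inner loop: 'for i, c in enumerate(b_id): if not(c == '*' or c == u_id[i]): flag = False; break'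
-- (u_id[i] is ported via pyGet?; under A's length guard the index is always in range)
def pvALoop (ul : List Char) : Nat → List Char → Bool
  | _, [] => true
  | i, c :: rest =>
    if !(c == '*' || PySem.List.pyGet? ul (i : Int) == some c) then false
    else pvALoop ul (i + 1) rest

def find_banned_id (user_id : List String) (b_id : String) : List String :=
  user_id.foldl (fun result u_id =>
    if PySem.Str.len u_id ≠ PySem.Str.len b_id then result
    else if pvALoop u_id.toList 0 b_id.toList then result ++ [u_id] else result) []

-- ===== PORT B =====
-- 'matches' consumes both strings head-by-head; the trailing 'not p and not u'
-- is the base cases.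
def pvBMatch : List Char → List Char → Bool
  | p :: ps, u :: us => if p != '*' && p != u then false else pvBMatch ps us
  | [], [] => true
  | _, _ => false

def find_banned_id_alt (user_id : List String) (b_id : String) : List String :=
  user_id.filter (fun u => pvBMatch b_id.toList u.toList)

-- ===== PRECONDITION & SPEC =====
def Spec_find_banned_id (user_id : List String) (b_id : String) (out : List String) : Prop := out = find_banned_id_alt user_id b_id
instance (user_id : List String) (b_id : String) (out : List String) : Decidable (Spec_find_banned_id user_id b_id out) := by unfold Spec_find_banned_id; infer_instance

-- ===== CLAIM (what is proved, stated in full; the proofs are below) =====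
def Claim_equal_find_banned_id : Prop := ∀ (user_id : List String) (b_id : String), Dom_find_banned_id user_id b_id → Spec_find_banned_id user_id b_id (find_banned_id user_id b_id)

-- ===== LEMMAS AND PROOFS =====

-- a length mismatch makes B's matcher fail
theorem pvBMatch_len {p u : List Char} (h : p.length ≠ u.length) : pvBMatch p u = false := by
  induction p generalizing u with
  | nil => cases u with
    | nil => simp at h
    | cons _ _ => simp [pvBMatch]
  | cons c ps ih =>
    cases u with
    | nil => simp [pvBMatch]
    | cons d us =>
      simp only [pvBMatch]
      split
      · rfl
      · exact ih (by simpa using h)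

-- on equal lengths, A's indexed loop from position pre.length agrees with B's matcher
theorem pvALoop_eq (bl : List Char) : ∀ (pre rest : List Char), rest.length = bl.length →
    pvALoop (pre ++ rest) pre.length bl = pvBMatch bl rest := by
  induction bl with
  | nil =>
    intro pre rest h
    cases rest with
    | nil => simp [pvALoop, pvBMatch]
    | cons _ _ => simp at h
  | cons c bs ih =>
    intro pre rest h
    cases rest with
    | nil => simp at h
    | cons d us =>
      have hget : PySem.List.pyGet? (pre ++ d :: us) ((pre.length : Int)) = some d := by
        rw [PySem.List.pyGet?_natCast]
        simp
      simp only [pvALoop, pvBMatch, hget]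
      have hs : pre ++ d :: us = (pre ++ [d]) ++ us := by simp
      by_cases hc : (c == '*' || c == d) = true
      · have hc' : ¬ ((c != '*' && c != d) = true) := by
          rcases Bool.or_eq_true_iff.mp hc with h1 | h1 <;> simp [bne, h1]
        rw [if_neg (by
          simp
          intro hne
          rcases Bool.or_eq_true_iff.mp hc with h1 | h1
          · exact absurd (by simpa using h1) hne
          · exact (by simpa using h1 : c = d).symm), if_neg hc']
        have := ih (pre ++ [d]) us (by simpa using h)
        rw [hs]
        simpa using this
      · have hc0 := hc
        simp only [Bool.or_eq_true, not_or, Bool.not_eq_true] at hc0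
        have hc' : (c != '*' && c != d) = true := by
          simp [bne, hc0.1, hc0.2]
        rw [if_pos (by
          simp
          simp only [beq_eq_false_iff_ne, ne_eq] at hc0
          exact ⟨hc0.1, fun hh => hc0.2 hh.symm⟩), if_pos hc']

-- A's per-element body is B's filter test
theorem pvBody_eq (b_id : String) :
    (fun (result : List String) u_id =>
      if PySem.Str.len u_id ≠ PySem.Str.len b_id then result
      else if pvALoop u_id.toList 0 b_id.toList then result ++ [u_id] else result)
    = (fun (result : List String) u =>
      if pvBMatch b_id.toList u.toList then result ++ [u] else result) := by
  funext result u
  by_cases hl : PySem.Str.len u ≠ PySem.Str.len b_id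
  · have hlen : b_id.toList.length ≠ u.toList.length := by
      simp only [PySem.Str.len_eq] at hl
      omega
    rw [if_pos hl, pvBMatch_len hlen, if_neg (by simp)]
  · have hlen : u.toList.length = b_id.toList.length := by
      simp only [PySem.Str.len_eq] at hl
      omega
    rw [if_neg hl]
    have h2 : pvALoop u.toList 0 b_id.toList = pvBMatch b_id.toList u.toList := by
      simpa using pvALoop_eq b_id.toList [] u.toList hlen
    rw [h2]

-- ===== VERDICT (by name: the statement is the Claim_ definition above) =====
theorem find_banned_id_spec : Claim_equal_find_banned_id := by
  intro user_id b_id _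
  unfold Spec_find_banned_id find_banned_id find_banned_id_alt
  rw [pvBody_eq b_id]
  simpa using PySem.List.foldl_append_if_eq_filter
    (fun u => pvBMatch b_id.toList u.toList) user_id ([] : List String)
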